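-- pv_equiv track=rewrite | github.com/philipm7/DocSearch | app/domain/changes.py | replace_nth_occurrence
-- ===== SOURCE A (Python) =====
-- from typing import List, Dict, Tuple
--
-- class ChangeValidationError(ValueError):
--     """Raised when a change request is structurally valid JSON but semantically invalid."""
--
-- class TargetNotFoundError(ValueError):
--     """Raised when the requested occurrence of the target text can't be found."""
--
-- def replace_nth_occurrence(text: str, target: str, replacement: str, occurrence: int) -> Tuple[str, int, int]:
--     """
--     Replace the Nth (1-based) occurrence of `target` in `text` with `replacement`.
--
--     Returns: (new_text, found_start, found_end) where found_end is the end index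
--     (exclusive) of the matched target span in the *old* text.
--     """
--     if target is None or target == "":
--         raise ChangeValidationError("target.text must be a non-empty string")
--     if occurrence is None or occurrence < 1:
--         raise ChangeValidationError("target.occurrence must be >= 1")
--
--     start = 0
--     found_at = -1
--     for _ in range(occurrence):
--         found_at = text.find(target, start)
--         if found_at == -1:
--             raise TargetNotFoundError(f"Could not find occurrence {occurrence} of target text")
--         start = found_at + len(target)
--
--     found_start = found_at
--     found_end = found_at + len(target)
--     new_text = text[:found_start] + replacement + text[found_end:]
--     return new_text, found_start, found_end
-- ===== SOURCE B (Python) =====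
-- class ChangeValidationError(ValueError):
--     pass
--
-- class TargetNotFoundError(ValueError):
--     pass
--
-- def replace_nth_occurrence(text: str, target: str, replacement: str, occurrence: int):
--     if target is None or target == "":
--         raise ChangeValidationError("target.text must be a non-empty string")
--     if occurrence is None or occurrence < 1:
--         raise ChangeValidationError("target.occurrence must be >= 1")
--
--     # Split on the target: k non-overlapping occurrences <=> k+1 parts.
--     parts = text.split(target)
--     if len(parts) - 1 < occurrence:
--         raise TargetNotFoundError(f"Could not find occurrence {occurrence} of target text")
--
--     # Start of the Nth occurrence = lengths of the first N parts plus N-1 separators.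
--     found_start = sum(len(p) for p in parts[:occurrence]) + (occurrence - 1) * len(target)
--     found_end = found_start + len(target)
--     new_text = text[:found_start] + replacement + text[found_end:]
--     return new_text, found_start, found_end
-- ===== Notes on version B (the rewrite author's own statement) =====
-- stated objective: alternative
-- what changed: B replaces A's repeat-occurrence-times find loop with a split-based algorithm: text.split(target) gives the parts between non-overlapping occurrences, the occurrence count is len(parts)-1, and the Nth start index is recovered as the lengths of the first N parts plus N-1 separators.
import Mathlib
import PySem

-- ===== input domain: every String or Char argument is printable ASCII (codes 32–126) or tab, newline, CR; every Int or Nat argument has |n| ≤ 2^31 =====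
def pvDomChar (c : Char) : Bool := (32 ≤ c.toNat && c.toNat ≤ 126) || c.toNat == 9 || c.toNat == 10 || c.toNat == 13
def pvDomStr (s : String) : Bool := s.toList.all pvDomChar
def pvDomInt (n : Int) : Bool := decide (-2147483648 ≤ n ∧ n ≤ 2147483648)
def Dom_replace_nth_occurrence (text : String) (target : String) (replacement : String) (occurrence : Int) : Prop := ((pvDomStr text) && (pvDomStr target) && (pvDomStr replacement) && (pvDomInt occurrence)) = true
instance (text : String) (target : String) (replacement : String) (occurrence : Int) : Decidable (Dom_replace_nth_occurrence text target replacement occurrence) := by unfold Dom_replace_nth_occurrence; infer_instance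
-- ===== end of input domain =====

-- B replaces A's repeat-occurrence-times find loop with a split-based algorithm: split the text
-- on the target, count parts, and recover the Nth start from the part lengths (alternative decomposition).


-- ===== PORT A =====
-- A's loop: 'for _ in range(occurrence): found_at = text.find(target, start); if -1: raise; start = found_at + len(target)'.
-- none = TargetNotFoundError (excluded by Pre_).
def pvALoop (t tgt : List Char) : Nat → Int → Option Int
  | 0, _ => none
  | n+1, start =>
      let f := PySem.Chars.findFrom t tgt start none
      if f = -1 then none
      else match n with
        | 0 => some f
        | m+1 => pvALoop t tgt (m+1) (f + (tgt.length : Int))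

def replace_nth_occurrence (text : String) (target : String) (replacement : String) (occurrence : Int) : String × Int × Int :=
  if target = "" then ("", -1, -1)            -- raise ChangeValidationError (outside Pre_)
  else if occurrence < 1 then ("", -1, -1)    -- raise ChangeValidationError (outside Pre_)
  else match pvALoop text.toList target.toList occurrence.toNat 0 with
    | none => ("", -1, -1)                    -- raise TargetNotFoundError (outside Pre_)
    | some f =>
        let fe := f + (target.toList.length : Int)
        (String.ofList (PySem.List.slice text.toList none (some f) ++ replacement.toList ++ PySem.List.slice text.toList (some fe) none),
         f, fe)

-- ===== PORT B =====
-- B: parts = text.split(target); raise if len(parts)-1 < occurrence; the Nth start is the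
-- lengths of the first N parts plus N-1 separators.
def replace_nth_occurrence_alt (text : String) (target : String) (replacement : String) (occurrence : Int) : String × Int × Int :=
  if target = "" then ("", -1, -1)            -- raise ChangeValidationError (outside Pre_)
  else if occurrence < 1 then ("", -1, -1)    -- raise ChangeValidationError (outside Pre_)
  else
    let parts := PySem.Chars.splitOn text.toList target.toList
    if (parts.length : Int) - 1 < occurrence then ("", -1, -1)   -- raise TargetNotFoundError (outside Pre_)
    else
      let fs : Int := (((parts.take occurrence.toNat).map List.length).sum : Int) + (occurrence - 1) * (target.toList.length : Int)
      let fe := fs + (target.toList.length : Int)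
      (String.ofList (PySem.List.slice text.toList none (some fs) ++ replacement.toList ++ PySem.List.slice text.toList (some fe) none),
       fs, fe)

-- ===== PRECONDITION & SPEC =====
-- Pre_ excludes exactly the inputs where A raises: empty target, occurrence < 1, or fewer than
-- `occurrence` non-overlapping occurrences of target in text (str.count counts non-overlapping matches).
def Pre_replace_nth_occurrence (text : String) (target : String) (replacement : String) (occurrence : Int) : Prop :=
  target ≠ "" ∧ 1 ≤ occurrence ∧ occurrence ≤ (PySem.Str.count text target : Int)
instance (text : String) (target : String) (replacement : String) (occurrence : Int) : Decidable (Pre_replace_nth_occurrence text target replacement occurrence) := by unfold Pre_replace_nth_occurrence; infer_instance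

def pvWitness_replace_nth_occurrence : String × String × String × Int := ("abab", "ab", "X", 2)

def Spec_replace_nth_occurrence (text : String) (target : String) (replacement : String) (occurrence : Int) (out : String × Int × Int) : Prop := out = replace_nth_occurrence_alt text target replacement occurrence
instance (text : String) (target : String) (replacement : String) (occurrence : Int) (out : String × Int × Int) : Decidable (Spec_replace_nth_occurrence text target replacement occurrence out) := by unfold Spec_replace_nth_occurrence; infer_instance

-- ===== CLAIM (what is proved, stated in full; the proofs are below) =====
def Claim_equal_replace_nth_occurrence : Prop := ∀ (text : String) (target : String) (replacement : String) (occurrence : Int), Dom_replace_nth_occurrence text target replacement occurrence → Pre_replace_nth_occurrence text target replacement occurrence → Spec_replace_nth_occurrence text target replacement occurrence (replace_nth_occurrence text target replacement occurrence)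

-- ===== LEMMAS AND PROOFS =====

theorem pvFindSpec (l sub : List Char) (h : PySem.Chars.find l sub ≠ -1) :
    0 ≤ PySem.Chars.find l sub ∧ sub <+: l.drop (PySem.Chars.find l sub).toNat := by
  have hs := PySem.Chars.findFrom_natCast_spec l sub 0 (Nat.zero_le _)
  simp only [Nat.cast_zero, PySem.Chars.findFrom_zero] at hs
  have := hs h
  exact ⟨this.1, this.2.1⟩

theorem pvFind_nil (sub : List Char) (h : sub ≠ []) : PySem.Chars.find [] sub = -1 := by
  simp [PySem.Chars.find, PySem.Chars.find.go, h]

theorem pvFindGo_acc (sub : List Char) : ∀ (l : List Char) (k : Nat),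
    PySem.Chars.find.go sub l k =
      if PySem.Chars.find.go sub l 0 = -1 then -1 else (k : Int) + PySem.Chars.find.go sub l 0 := by
  intro l
  induction l with
  | nil =>
      intro k
      by_cases h : sub.isEmpty <;> simp [PySem.Chars.find.go, h]
  | cons c t ih =>
      intro k
      by_cases h : sub.isPrefixOf (c :: t)
      · simp [PySem.Chars.find.go, h]
      · simp only [PySem.Chars.find.go, h, if_false, Bool.false_eq_true]
        rw [ih (k+1), ih 1]
        by_cases h0 : PySem.Chars.find.go sub t 0 = -1
        · simp [h0]
        · have hge : 0 ≤ PySem.Chars.find.go sub t 0 := by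
            have := (pvFindSpec t sub (by simpa [PySem.Chars.find] using h0)).1
            simpa [PySem.Chars.find] using this
          simp only [h0, if_false]
          rw [if_neg (by omega)]
          push_cast
          ring

theorem pvFind_prefix (l sub : List Char) (h : sub.isPrefixOf l = true) :
    PySem.Chars.find l sub = 0 := by
  cases l with
  | nil =>
      have : sub = [] := by
        have := List.isPrefixOf_iff_prefix.mp h
        simpa using List.prefix_nil.mp this
      simp [PySem.Chars.find, PySem.Chars.find.go, this]
  | cons c t => simp [PySem.Chars.find, PySem.Chars.find.go, h]

theorem pvFind_cons_not_prefix (c : Char) (t sub : List Char) (h : sub.isPrefixOf (c :: t) = false) :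
    PySem.Chars.find (c :: t) sub =
      if PySem.Chars.find t sub = -1 then -1 else 1 + PySem.Chars.find t sub := by
  simp only [PySem.Chars.find, PySem.Chars.find.go, h, Bool.false_eq_true, if_false]
  rw [pvFindGo_acc sub t 1]
  by_cases h0 : PySem.Chars.find.go sub t 0 = -1 <;> simp [h0]

-- reference split: the pure-recursion shape of str.split(sep)
def pvGlue (p : List Char) : List (List Char) → List (List Char)
  | [] => [p]
  | x :: xs => (p ++ x) :: xs

def pvSplit (sep : List Char) : List Char → List (List Char)
  | [] => [[]]
  | c :: rest =>
      if h : sep ≠ [] ∧ sep.isPrefixOf (c :: rest) = true then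
        [] :: pvSplit sep ((c :: rest).drop sep.length)
      else
        pvGlue [c] (pvSplit sep rest)
termination_by l => l.length
decreasing_by
  · have := List.length_pos_iff.mpr h.1
    simp only [List.length_drop, List.length_cons]
    omega
  · simp

theorem pvGlue_ne_nil (p : List Char) (xs : List (List Char)) : pvGlue p xs ≠ [] := by
  cases xs <;> simp [pvGlue]

theorem pvGlue_glue (p q : List Char) (xs : List (List Char)) :
    pvGlue p (pvGlue q xs) = pvGlue (p ++ q) xs := by
  cases xs <;> simp [pvGlue]

theorem pvSplit_ne_nil (sep l : List Char) : pvSplit sep l ≠ [] := by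
  cases l with
  | nil => simp [pvSplit]
  | cons c rest =>
      rw [pvSplit]
      split
      · simp
      · exact pvGlue_ne_nil _ _

theorem pvGo (sep : List Char) (hs : sep ≠ []) : ∀ (fuel : Nat) (l cur : List Char) (acc : List (List Char)),
    l.length < fuel →
    PySem.Chars.splitOn.go sep fuel l cur acc = acc.reverse ++ pvGlue cur.reverse (pvSplit sep l) := by
  intro fuel
  induction fuel with
  | zero => intro l cur acc h; omega
  | succ f ih =>
      intro l cur acc h
      cases l with
      | nil =>
          simp [PySem.Chars.splitOn.go, pvSplit, pvGlue]
      | cons c rest =>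
          by_cases hp : sep.isPrefixOf (c :: rest) = true
          · have hstep : PySem.Chars.splitOn.go sep (f+1) (c :: rest) cur acc
                = PySem.Chars.splitOn.go sep f ((c :: rest).drop sep.length) [] (cur.reverse :: acc) := by
              simp [PySem.Chars.splitOn.go, hp]
            have hlen : ((c :: rest).drop sep.length).length < f := by
              have := List.length_pos_iff.mpr hs
              simp only [List.length_drop, List.length_cons] at *
              omega
            rw [hstep, ih _ _ _ hlen]
            obtain ⟨x, xs, hx⟩ := List.exists_cons_of_ne_nil (pvSplit_ne_nil sep ((c :: rest).drop sep.length))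
            rw [pvSplit]
            rw [dif_pos ⟨hs, hp⟩]
            simp [hx, pvGlue]
          · have hp' : sep.isPrefixOf (c :: rest) = false := eq_false_of_ne_true hp
            have hstep : PySem.Chars.splitOn.go sep (f+1) (c :: rest) cur acc
                = PySem.Chars.splitOn.go sep f rest (c :: cur) acc := by
              simp [PySem.Chars.splitOn.go, hp']
            simp only [List.length_cons] at h
            rw [hstep, ih _ _ _ (by omega)]
            rw [pvSplit, dif_neg (by simp [hp']), pvGlue_glue]
            simp

theorem pvSplitOn_eq (l sep : List Char) (hs : sep ≠ []) :
    PySem.Chars.splitOn l sep = pvSplit sep l := by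
  rw [PySem.Chars.splitOn, pvGo sep hs (l.length + 1) l [] [] (by omega)]
  obtain ⟨x, xs, hx⟩ := List.exists_cons_of_ne_nil (pvSplit_ne_nil sep l)
  simp [hx, pvGlue]

theorem pvSplit_find (sep : List Char) (hs : sep ≠ []) : ∀ (l : List Char),
    pvSplit sep l =
      if PySem.Chars.find l sep = -1 then [l]
      else l.take (PySem.Chars.find l sep).toNat ::
           pvSplit sep (l.drop ((PySem.Chars.find l sep).toNat + sep.length)) := by
  intro l
  induction l with
  | nil =>
      rw [if_pos (pvFind_nil sep hs)]
      simp [pvSplit]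
  | cons c rest ih =>
      by_cases hp : sep.isPrefixOf (c :: rest) = true
      · have hf : PySem.Chars.find (c :: rest) sep = 0 := pvFind_prefix _ _ hp
        rw [pvSplit, dif_pos ⟨hs, hp⟩, hf]
        norm_num
      · have hp' : sep.isPrefixOf (c :: rest) = false := eq_false_of_ne_true hp
        have hf := pvFind_cons_not_prefix c rest sep hp'
        by_cases h0 : PySem.Chars.find rest sep = -1
        · have hf' : PySem.Chars.find (c :: rest) sep = -1 := by rw [hf, if_pos h0]
          rw [pvSplit, dif_neg (by simp [hp']), ih, if_pos h0, hf', if_pos rfl]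
          simp [pvGlue]
        · have hge : 0 ≤ PySem.Chars.find rest sep := (pvFindSpec rest sep h0).1
          have hf' : PySem.Chars.find (c :: rest) sep = 1 + PySem.Chars.find rest sep := by
            rw [hf, if_neg h0]
          rw [pvSplit, dif_neg (by simp [hp']), ih, if_neg h0, hf', if_neg (by omega)]
          have ht : (1 + PySem.Chars.find rest sep).toNat = (PySem.Chars.find rest sep).toNat + 1 := by
            omega
          have hd : (PySem.Chars.find rest sep).toNat + 1 + sep.length
              = ((PySem.Chars.find rest sep).toNat + sep.length) + 1 := by omega
          rw [ht, hd, List.drop_succ_cons, List.take_succ_cons]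
          simp [pvGlue]

-- select the Nth match start from the split parts
def pvNth (L : Nat) : List (List Char) → Nat → Nat → Option Int
  | [], _, _ => none
  | [_], _, _ => none
  | p :: q :: ps, 0, base => some ((base + p.length : Nat) : Int)
  | p :: q :: ps, n+1, base => pvNth L (q :: ps) n (base + p.length + L)

theorem pvAB (t sep : List Char) (hs : sep ≠ []) : ∀ (n k : Nat), k ≤ t.length →
    pvALoop t sep (n+1) (k : Int) = pvNth sep.length (pvSplit sep (t.drop k)) n k := by
  have hL : 0 < sep.length := List.length_pos_iff.mpr hs
  have key : ∀ (k : Nat), k ≤ t.length → PySem.Chars.find (t.drop k) sep ≠ -1 →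
      PySem.Chars.findFrom t sep (k : Int) none
        = ((k + (PySem.Chars.find (t.drop k) sep).toNat : Nat) : Int)
      ∧ k + (PySem.Chars.find (t.drop k) sep).toNat + sep.length ≤ t.length := by
    intro k hk hf
    obtain ⟨hge, hpre⟩ := pvFindSpec (t.drop k) sep hf
    have hlen := hpre.length_le
    simp only [List.length_drop] at hlen
    refine ⟨?_, by omega⟩
    rw [PySem.Chars.findFrom_natCast t sep k hk, if_neg hf]
    push_cast [Int.toNat_of_nonneg hge]
    ring
  intro n
  induction n with
  | zero =>
      intro k hk
      by_cases hf : PySem.Chars.find (t.drop k) sep = -1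
      · have hm : PySem.Chars.findFrom t sep (k : Int) none = -1 := by
          rw [PySem.Chars.findFrom_natCast t sep k hk, if_pos hf]
        rw [pvSplit_find sep hs (t.drop k), if_pos hf]
        simp [pvALoop, hm, pvNth]
      · obtain ⟨hm, hub⟩ := key k hk hf
        have hne : PySem.Chars.findFrom t sep (k : Int) none ≠ -1 := by rw [hm]; omega
        have hpl : ((t.drop k).take (PySem.Chars.find (t.drop k) sep).toNat).length
            = (PySem.Chars.find (t.drop k) sep).toNat := by
          simp only [List.length_take, List.length_drop]
          omega
        obtain ⟨x, xs, hx⟩ := List.exists_cons_of_ne_nil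
          (pvSplit_ne_nil sep ((t.drop k).drop ((PySem.Chars.find (t.drop k) sep).toNat + sep.length)))
        rw [pvSplit_find sep hs (t.drop k), if_neg hf, hx]
        simp only [pvALoop, if_neg hne, pvNth, hpl, hm]
        rw [if_neg (by omega)]
  | succ m ih =>
      intro k hk
      by_cases hf : PySem.Chars.find (t.drop k) sep = -1
      · have hm : PySem.Chars.findFrom t sep (k : Int) none = -1 := by
          rw [PySem.Chars.findFrom_natCast t sep k hk, if_pos hf]
        rw [pvSplit_find sep hs (t.drop k), if_pos hf]
        simp [pvALoop, hm, pvNth]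
      · obtain ⟨hm, hub⟩ := key k hk hf
        have hne : PySem.Chars.findFrom t sep (k : Int) none ≠ -1 := by rw [hm]; omega
        have hpl : ((t.drop k).take (PySem.Chars.find (t.drop k) sep).toNat).length
            = (PySem.Chars.find (t.drop k) sep).toNat := by
          simp only [List.length_take, List.length_drop]
          omega
        have hdd : (t.drop k).drop ((PySem.Chars.find (t.drop k) sep).toNat + sep.length)
            = t.drop (k + (PySem.Chars.find (t.drop k) sep).toNat + sep.length) := by
          rw [List.drop_drop]
          congr 1
          omega
        have hnext : PySem.Chars.findFrom t sep (k : Int) none + (sep.length : Int)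
            = ((k + (PySem.Chars.find (t.drop k) sep).toNat + sep.length : Nat) : Int) := by
          rw [hm]
          push_cast
          ring
        obtain ⟨x, xs, hx⟩ := List.exists_cons_of_ne_nil
          (pvSplit_ne_nil sep (t.drop (k + (PySem.Chars.find (t.drop k) sep).toNat + sep.length)))
        rw [pvSplit_find sep hs (t.drop k), if_neg hf, hdd, hx]
        simp only [pvALoop, if_neg hne, pvNth, hpl]
        rw [hnext, ih _ (by omega), hx]

theorem pvNth_closed (L : Nat) : ∀ (ps : List (List Char)) (n base : Nat),
    pvNth L ps n base =
      if n + 2 ≤ ps.length then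
        some (((base + ((ps.take (n+1)).map List.length).sum + n * L : Nat)) : Int)
      else none := by
  intro ps
  induction ps with
  | nil => intro n base; cases n <;> simp [pvNth]
  | cons p qs ih =>
      intro n base
      cases qs with
      | nil => cases n <;> simp [pvNth]
      | cons q ps' =>
          cases n with
          | zero => simp [pvNth]
          | succ m =>
              show pvNth L (q :: ps') m (base + p.length + L) = _
              rw [ih m (base + p.length + L)]
              by_cases h : m + 2 ≤ (q :: ps').length
              · rw [if_pos h, if_pos (by simp at h ⊢; omega)]
                congr 1
                simp only [List.take_succ_cons, List.map_cons, List.sum_cons]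
                push_cast
                ring
              · rw [if_neg h, if_neg (by simp at h ⊢; omega)]

theorem pv_main (text target replacement : String) (occurrence : Int)
    (h1 : target ≠ "") (h2 : 1 ≤ occurrence) :
    replace_nth_occurrence text target replacement occurrence
      = replace_nth_occurrence_alt text target replacement occurrence := by
  have htgt : target.toList ≠ [] := by
    simpa [String.toList_eq_nil_iff] using h1
  obtain ⟨m, hm⟩ : ∃ m, occurrence.toNat = m + 1 := ⟨occurrence.toNat - 1, by omega⟩
  have hocc : occurrence = ((m + 1 : Nat) : Int) := by omega
  have hA := pvAB text.toList target.toList htgt m 0 (Nat.zero_le _)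
  simp only [Nat.cast_zero, List.drop_zero] at hA
  rw [replace_nth_occurrence, replace_nth_occurrence_alt,
      if_neg h1, if_neg h1, if_neg (by omega), if_neg (by omega)]
  rw [pvSplitOn_eq text.toList target.toList htgt]
  set parts := pvSplit target.toList text.toList with hparts
  simp only [hm]
  rw [hA, pvNth_closed]
  by_cases hl : m + 2 ≤ parts.length
  · rw [if_pos hl, if_neg (by rw [hocc]; push_cast; omega)]
    have hfs : (((0 + ((parts.take (m+1)).map List.length).sum + m * target.toList.length : Nat)) : Int)
        = ((((parts.take (m+1)).map List.length).sum : Int))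
          + (occurrence - 1) * (target.toList.length : Int) := by
      have h1' : occurrence - 1 = (m : Int) := by omega
      rw [h1']
      push_cast
      ring
    rw [hfs]
  · rw [if_neg hl, if_pos (by rw [hocc]; push_cast; omega)]

-- ===== VERDICT (by name: the statement is the Claim_ definition above) =====
theorem replace_nth_occurrence_spec : Claim_equal_replace_nth_occurrence := by
  intro text target replacement occurrence _ hp
  unfold Spec_replace_nth_occurrence
  exact pv_main text target replacement occurrence hp.1 hp.2.1
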